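-- pv_equiv track=rewrite | github.com/MaxiLargo/Python | Soluciones/Parciales/Parcial2.py | viajes_por_dia
-- ===== SOURCE A (Python) =====
-- def pertenececlave(d:dict,s:str)->bool:
--     res=False
--     for c,v in d.items():
--         if c == s:
--             res=True
--
--     return res
--
-- def viajes_por_dia(viajesdiarios:dict[str,list[str]],usuarios:list[str])->dict[str,int]:
--     res = {}
--     for c,v in viajesdiarios.items():
--         for k in v:
--             if not pertenececlave(res,k):
--                 res[k]=1
--             else:
--                 res[k]+=1
--     return res
-- ===== SOURCE B (Python) =====
-- def viajes_por_dia(viajesdiarios: dict[str, list[str]], usuarios: list[str]) -> dict[str, int]: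
--     flat = [k for v in viajesdiarios.values() for k in v]
--     return {k: flat.count(k) for k in dict.fromkeys(flat)}
-- ===== Notes on version B (the rewrite author's own statement) =====
-- stated objective: simpler
-- what changed: Replaces the incremental dict build with its per-entry full-dict membership scan (pertenececlave) by flattening all day lists once, deduplicating with dict.fromkeys, and counting each distinct entry with list.count in a two-line comprehension.
import Mathlib
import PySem

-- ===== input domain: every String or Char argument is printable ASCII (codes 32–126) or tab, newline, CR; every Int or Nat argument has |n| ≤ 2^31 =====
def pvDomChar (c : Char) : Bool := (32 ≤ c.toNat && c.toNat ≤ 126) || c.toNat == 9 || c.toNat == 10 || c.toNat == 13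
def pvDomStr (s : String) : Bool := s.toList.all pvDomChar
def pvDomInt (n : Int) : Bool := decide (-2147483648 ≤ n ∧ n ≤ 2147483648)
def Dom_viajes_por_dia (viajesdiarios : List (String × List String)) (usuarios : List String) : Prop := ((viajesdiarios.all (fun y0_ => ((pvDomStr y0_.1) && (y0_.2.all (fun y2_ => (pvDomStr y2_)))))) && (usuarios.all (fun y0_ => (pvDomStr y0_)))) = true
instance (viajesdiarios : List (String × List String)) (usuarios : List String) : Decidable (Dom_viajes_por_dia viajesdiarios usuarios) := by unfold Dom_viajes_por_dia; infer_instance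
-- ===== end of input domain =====

-- B is simpler: it flattens all day lists once, deduplicates with dict.fromkeys and counts each
-- distinct entry with list.count, instead of A's incremental dict build with a per-entry membership scan.


-- ===== PORT A =====
def pertenececlave (d : PySem.Dict String Int) (s : String) : Bool :=
  d.items.foldl (fun res cv => if cv.1 == s then true else res) false

def viajes_por_dia (viajesdiarios : List (String × List String)) (usuarios : List String) : List (String × Int) :=
  (viajesdiarios.foldl (fun res cv =>
    cv.2.foldl (fun res k =>
      if !(pertenececlave res k) then
        res.insert k 1
      else
        -- res[k] += 1 : k is present here, so the default 0 of getD is never read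
        res.insert k (res.getD k 0 + 1)) res) PySem.Dict.empty).items

-- ===== PORT B =====
def viajes_por_dia_alt (viajesdiarios : List (String × List String)) (usuarios : List String) : List (String × Int) :=
  let flat := viajesdiarios.flatMap (fun v => v.2)
  (PySem.List.dedup flat).map (fun k => (k, (flat.count k : Int)))

-- ===== PRECONDITION & SPEC =====
def Spec_viajes_por_dia (viajesdiarios : List (String × List String)) (usuarios : List String) (out : List (String × Int)) : Prop := out = viajes_por_dia_alt viajesdiarios usuarios
instance (viajesdiarios : List (String × List String)) (usuarios : List String) (out : List (String × Int)) : Decidable (Spec_viajes_por_dia viajesdiarios usuarios out) := by unfold Spec_viajes_por_dia; infer_instance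

-- ===== CLAIM (what is proved, stated in full; the proofs are below) =====
def Claim_equal_viajes_por_dia : Prop := ∀ (viajesdiarios : List (String × List String)) (usuarios : List String), Dom_viajes_por_dia viajesdiarios usuarios → Spec_viajes_por_dia viajesdiarios usuarios (viajes_por_dia viajesdiarios usuarios)

-- ===== LEMMAS AND PROOFS =====

-- pertenececlave is key membership
theorem foldl_if_eq_or_any {α : Type} (p : α → Bool) (l : List α) (b : Bool) :
    l.foldl (fun res x => if p x then true else res) b = (b || l.any p) := by
  induction l generalizing b with
  | nil => simp
  | cons x xs ih =>
    simp only [List.foldl_cons, List.any_cons, ih]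
    by_cases h : p x = true <;> simp [h]

theorem pertenececlave_eq_contains (d : PySem.Dict String Int) (s : String) :
    pertenececlave d s = d.contains s := by
  rw [pertenececlave, foldl_if_eq_or_any]
  simp only [PySem.Dict.contains_eq_decide_mem_keys, PySem.Dict.keys]
  rw [Bool.eq_iff_iff]
  simp [List.any_eq_true, List.mem_map]

-- A's update step is the counter step
theorem step_eq_counter_step (res : PySem.Dict String Int) (k : String) :
    (if !(pertenececlave res k) then res.insert k 1 else res.insert k (res.getD k 0 + 1))
      = res.insert k (res.getD k 0 + 1) := by
  rw [pertenececlave_eq_contains]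
  by_cases h : res.contains k = true
  · simp [h]
  · simp only [Bool.not_eq_true] at h
    simp [h, PySem.Dict.getD_of_not_contains _ _ h]

-- the nested loop is the loop over the flattened list
theorem foldl_foldl_eq_foldl_flatMap {α β γ : Type} (g : β → List γ)
    (f : α → γ → α) (l : List β) (init : α) :
    l.foldl (fun acc x => (g x).foldl f acc) init = (l.flatMap g).foldl f init := by
  induction l generalizing init with
  | nil => rfl
  | cons x xs ih => simp [List.flatMap_cons, List.foldl_append, ih]

-- ===== VERDICT (by name: the statement is the Claim_ definition above) =====
theorem viajes_por_dia_spec : Claim_equal_viajes_por_dia := by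
  intro viajesdiarios usuarios _
  unfold Spec_viajes_por_dia viajes_por_dia viajes_por_dia_alt
  have hstep : ∀ (res : PySem.Dict String Int) (cv : String × List String),
      cv.2.foldl (fun res k =>
        if !(pertenececlave res k) then res.insert k 1
        else res.insert k (res.getD k 0 + 1)) res
        = cv.2.foldl (fun d x => d.insert x (d.getD x 0 + 1)) res := by
    intro res cv
    exact PySem.List.foldl_congr_mem _ _ _ _ (fun acc x _ => step_eq_counter_step acc x)
  calc (viajesdiarios.foldl (fun res cv =>
          cv.2.foldl (fun res k =>
            if !(pertenececlave res k) then res.insert k 1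
            else res.insert k (res.getD k 0 + 1)) res) PySem.Dict.empty).items
      = (viajesdiarios.foldl (fun res cv =>
          cv.2.foldl (fun d x => d.insert x (d.getD x 0 + 1)) res) PySem.Dict.empty).items := by
        exact congrArg PySem.Dict.items
          (PySem.List.foldl_congr_mem _ _ _ _ (fun acc cv _ => hstep acc cv))
    _ = ((viajesdiarios.flatMap (fun v => v.2)).foldl
          (fun d x => d.insert x (d.getD x 0 + 1)) PySem.Dict.empty).items := by
        exact congrArg PySem.Dict.items (foldl_foldl_eq_foldl_flatMap _ _ _ _)
    _ = (PySem.Dict.counter (viajesdiarios.flatMap (fun v => v.2))).items := by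
        rw [PySem.Dict.foldl_insert_getD_add_one_eq_counter]
    _ = (PySem.List.dedup (viajesdiarios.flatMap (fun v => v.2))).map
          (fun k => (k, ((viajesdiarios.flatMap (fun v => v.2)).count k : Int))) := by
        rw [PySem.Dict.items_counter]; simp
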